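-- pv_equiv track=rewrite | github.com/fr4iser90/AgentLayer_-_Jetson-Orin-Nano-Super-Developer-Kit-dedicated | plugins/tools/agent/core/coding/coding_edit.py | _whitespace_replace
-- ===== SOURCE A (Python) =====
-- def _whitespace_replace(content: str, find: str) -> str | None:
--     def normalize(s: str) -> str:
--         return " ".join(s.split())
--     nf = normalize(find)
--     for i in range(len(content)):
--         for j in range(i + 1, len(content) + 1):
--             if normalize(content[i:j]) == nf:
--                 return content[:i] + "{{{REPLACEMENT}}}" + content[j:]
--     return None
-- ===== SOURCE B (Python) =====
-- def _whitespace_replace(content: str, find: str) -> str | None: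
--     nf = " ".join(find.split())
--     L = len(nf)
--     for i in range(len(content)):
--         p = 0            # chars of nf matched so far (= len of normalized content[i:j])
--         pending = False  # a normalized gap (single space) awaits the next word char
--         j = i
--         for c in content[i:]:
--             j += 1
--             if c.isspace():
--                 if p:
--                     pending = True
--             else:
--                 if pending:
--                     if p < L and nf[p] == " ":
--                         p += 1
--                         pending = False
--                     else:
--                         break
--                 if p < L and nf[p] == c:
--                     p += 1
--                 else:
--                     break
--             if p == L:
--                 return content[:i] + "{{{REPLACEMENT}}}" + content[j:]
--     return None
-- ===== Notes on version B (the rewrite author's own statement) =====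
-- stated objective: faster
-- what changed: Instead of re-normalizing every substring content[i:j] from scratch (a split/join inside two nested loops), B scans once from each start index, maintaining a matched-prefix pointer into the normalized needle plus a pending-gap flag, and abandons a start index as soon as the incremental normal form stops being a prefix of the needle.
import Mathlib
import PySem

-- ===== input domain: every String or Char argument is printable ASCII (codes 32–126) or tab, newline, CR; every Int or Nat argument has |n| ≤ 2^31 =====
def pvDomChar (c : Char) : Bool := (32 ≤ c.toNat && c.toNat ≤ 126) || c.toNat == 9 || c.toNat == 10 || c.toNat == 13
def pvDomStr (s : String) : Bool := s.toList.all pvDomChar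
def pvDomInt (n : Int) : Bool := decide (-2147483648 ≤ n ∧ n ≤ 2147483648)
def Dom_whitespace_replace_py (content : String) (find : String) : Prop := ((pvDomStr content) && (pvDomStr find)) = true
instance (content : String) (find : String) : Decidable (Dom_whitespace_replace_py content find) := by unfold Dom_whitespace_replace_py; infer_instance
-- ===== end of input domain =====

-- B replaces A's re-normalization of every substring content[i:j] by one incremental
-- prefix-matching scan per start index i with early abandonment (objective: faster).

-- ===== PORT A =====
-- normalize(s) = " ".join(s.split())
def pvNorm (s : List Char) : List Char :=
  PySem.Chars.join [' '] (PySem.Chars.split₀ s)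

-- A inner loop: for j in range(i+1, len(content)+1): if normalize(content[i:j]) == nf: return j
def pvAInner (cs nf : List Char) (i : Nat) : List Nat → Option Nat
  | [] => none
  | j :: js =>
    if pvNorm (PySem.List.slice cs (some (i : Int)) (some (j : Int))) = nf then some j
    else pvAInner cs nf i js

-- A outer loop: for i in range(len(content)); on a hit return content[:i] + "{{{REPLACEMENT}}}" + content[j:]
def pvALoop (cs nf : List Char) (n : Nat) : List Nat → Option (List Char)
  | [] => none
  | i :: is =>
    match pvAInner cs nf i (List.range' (i + 1) (n - i)) with
    | some j =>
        some (PySem.List.slice cs none (some (i : Int)) ++ "{{{REPLACEMENT}}}".toList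
              ++ PySem.List.slice cs (some (j : Int)) none)
    | none => pvALoop cs nf n is

def whitespace_replace_py (content : String) (find : String) : Option String :=
  let cs := content.toList
  let nf := pvNorm find.toList
  (pvALoop cs nf cs.length (List.range cs.length)).map String.ofList

-- ===== PORT B =====
-- B inner scan from start index i over content[i:]: p = matched chars of nf,
-- pending = a normalized gap (single space) awaits the next word char;
-- returns the absolute end index j of the first match, none on break/exhaustion
def pvBInner (nf : List Char) (L : Nat) : List Char → Nat → Nat → Bool → Option Nat
  | [], _, _, _ => none
  | c :: rest, j, p, pending =>
    if PySem.Chars.isspace c then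
      let pending := if 0 < p then true else pending
      if p = L then some (j + 1) else pvBInner nf L rest (j + 1) p pending
    else
      match (if pending then
               (if p < L ∧ nf[p]? = some ' ' then some (p + 1) else none)
             else some p) with
      | none => none
      | some p1 =>
        if p1 < L ∧ nf[p1]? = some c then
          if p1 + 1 = L then some (j + 1) else pvBInner nf L rest (j + 1) (p1 + 1) false
        else none

-- B outer loop: for i in range(n)
def pvBLoop (cs nf : List Char) : List Nat → Option (List Char)
  | [] => none
  | i :: is =>
    match pvBInner nf nf.length (cs.drop i) i 0 false with
    | some j => some (cs.take i ++ "{{{REPLACEMENT}}}".toList ++ cs.drop j)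
    | none => pvBLoop cs nf is

def whitespace_replace_py_alt (content : String) (find : String) : Option String :=
  let cs := content.toList
  let nf := pvNorm find.toList
  (pvBLoop cs nf (List.range cs.length)).map String.ofList

-- ===== PRECONDITION & SPEC =====
def Spec_whitespace_replace_py (content : String) (find : String) (out : Option String) : Prop := out = whitespace_replace_py_alt content find
instance (content : String) (find : String) (out : Option String) : Decidable (Spec_whitespace_replace_py content find out) := by unfold Spec_whitespace_replace_py; infer_instance

-- ===== CLAIM (what is proved, stated in full; the proofs are below) =====
def Claim_equal_whitespace_replace_py : Prop := ∀ (content : String) (find : String), Dom_whitespace_replace_py content find → Spec_whitespace_replace_py content find (whitespace_replace_py content find)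

-- ===== LEMMAS AND PROOFS =====
def pvStep (st : List Char × Bool) (c : Char) : List Char × Bool :=
  if PySem.Chars.isspace c then (st.1, st.2 || !st.1.isEmpty)
  else (st.1 ++ (if st.2 then [' ', c] else [c]), false)

theorem pvJoin_snoc (xs : List (List Char)) (y : List Char) :
    PySem.Chars.join [' '] (xs ++ [y]) =
      if xs.isEmpty then y else PySem.Chars.join [' '] xs ++ [' '] ++ y := by
  induction xs with
  | nil => simp [PySem.Chars.join_singleton]
  | cons a xs ih =>
    cases xs with
    | nil => simp [PySem.Chars.join_cons_cons, PySem.Chars.join_singleton]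
    | cons b xs =>
      simp only [List.cons_append, PySem.Chars.join_cons_cons, List.isEmpty_cons]
      rw [← List.cons_append, ih]
      simp

theorem pvJoin_ne_nil (ws : List (List Char)) (h : ∀ w ∈ ws, w ≠ []) :
    (PySem.Chars.join [' '] ws = [] ↔ ws = []) := by
  cases ws with
  | nil => simp [PySem.Chars.join_nil]
  | cons a ws =>
    cases ws with
    | nil =>
      simp [PySem.Chars.join_singleton]
      exact fun hh => (h a (by simp) hh).elim
    | cons b ws =>
      rw [PySem.Chars.join_cons_cons]
      constructor
      · intro hh
        have ha : a = [] := by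
          cases a with | nil => rfl | cons x xs => simp at hh
        exact absurd ha (h a (by simp))
      · intro hh; simp at hh

def pvFinish (cur : List Char) (acc : List (List Char)) : List (List Char) :=
  if cur.isEmpty then acc.reverse else (cur.reverse :: acc).reverse

theorem pvFinish_nonempty (cur : List Char) (acc : List (List Char))
    (h : ∀ w ∈ acc, w ≠ []) : ∀ w ∈ pvFinish cur acc, w ≠ [] := by
  intro w hw
  unfold pvFinish at hw
  split at hw
  · exact h w (List.mem_reverse.mp hw)
  · rcases List.mem_cons.mp (List.mem_reverse.mp hw) with hw | hw
    · subst hw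
      simp only [ne_eq, List.reverse_eq_nil_iff]
      intro hc; subst hc; simp_all
    · exact h w hw

theorem pvJoinFinish_isEmpty (cur : List Char) (acc : List (List Char))
    (h : ∀ w ∈ acc, w ≠ []) :
    (PySem.Chars.join [' '] (pvFinish cur acc)).isEmpty = (pvFinish cur acc).isEmpty := by
  by_cases hf : pvFinish cur acc = []
  · simp [hf, PySem.Chars.join_nil]
  · have := (pvJoin_ne_nil _ (pvFinish_nonempty cur acc h)).not.mpr hf
    have h1 : (PySem.Chars.join [' '] (pvFinish cur acc)).isEmpty = false := by
      simpa using this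
    have h2 : (pvFinish cur acc).isEmpty = false := by simpa using hf
    rw [h1, h2]

theorem pvGo_corr (t : List Char) : ∀ (cur : List Char) (acc : List (List Char)),
    (∀ w ∈ acc, w ≠ []) →
    PySem.Chars.join [' '] (PySem.Chars.split₀.go t cur acc) =
      (t.foldl pvStep
        (PySem.Chars.join [' '] (pvFinish cur acc), cur.isEmpty && !acc.isEmpty)).1 := by
  induction t with
  | nil =>
    intro cur acc h
    show PySem.Chars.join [' ']
        (if cur.isEmpty then acc.reverse else (cur.reverse :: acc).reverse) = _
    simp only [List.foldl_nil]
    unfold pvFinish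
    split <;> rfl
  | cons c rest ih =>
    intro cur acc h
    show PySem.Chars.join [' ']
        (if PySem.Chars.isspace c then
          (if cur.isEmpty then PySem.Chars.split₀.go rest [] acc
           else PySem.Chars.split₀.go rest [] (cur.reverse :: acc))
         else PySem.Chars.split₀.go rest (c :: cur) acc) = _
    simp only [List.foldl_cons]
    by_cases hws : PySem.Chars.isspace c = true
    · rw [if_pos hws]
      cases cur with
      | nil =>
        have hstate : pvStep (PySem.Chars.join [' '] (pvFinish [] acc),
            ([] : List Char).isEmpty && !acc.isEmpty) c
            = (PySem.Chars.join [' '] (pvFinish [] acc), ([] : List Char).isEmpty && !acc.isEmpty) := by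
          simp only [pvStep, hws, if_pos, pvJoinFinish_isEmpty [] acc h]
          cases acc <;> simp [pvFinish]
        rw [if_pos (show ([] : List Char).isEmpty = true from rfl), ih [] acc h, hstate]
      | cons x xs =>
        have hacc' : ∀ w ∈ (x :: xs).reverse :: acc, w ≠ [] := by
          intro w hw
          rcases List.mem_cons.mp hw with hw | hw
          · subst hw; simp
          · exact h w hw
        have heq : pvFinish [] ((x :: xs).reverse :: acc) = pvFinish (x :: xs) acc := by
          simp [pvFinish]
        have hstate : pvStep (PySem.Chars.join [' '] (pvFinish (x :: xs) acc),
            (x :: xs : List Char).isEmpty && !acc.isEmpty) c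
            = (PySem.Chars.join [' '] (pvFinish (x :: xs) acc),
               ([] : List Char).isEmpty && !((x :: xs).reverse :: acc).isEmpty) := by
          simp only [pvStep, hws, if_pos, pvJoinFinish_isEmpty (x :: xs) acc h]
          simp [pvFinish]
        rw [if_neg (show ¬((x :: xs : List Char).isEmpty = true) by simp), ih [] _ hacc',
            heq, hstate]
    · rw [if_neg hws, ih (c :: cur) acc h]
      have hstate : pvStep (PySem.Chars.join [' '] (pvFinish cur acc),
          cur.isEmpty && !acc.isEmpty) c
          = (PySem.Chars.join [' '] (pvFinish (c :: cur) acc),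
             (c :: cur : List Char).isEmpty && !acc.isEmpty) := by
        simp only [pvStep, hws, Bool.false_eq_true, if_false]
        rw [Prod.mk.injEq]
        refine ⟨?_, by simp⟩
        cases cur with
        | nil =>
          cases acc with
          | nil => simp [pvFinish, PySem.Chars.join_nil, PySem.Chars.join_singleton]
          | cons w ws =>
            have h1 : pvFinish [c] (w :: ws) = (w :: ws).reverse ++ [[c]] := by
              simp [pvFinish]
            rw [h1, pvJoin_snoc]
            simp [pvFinish]
        | cons x xs =>
          have h1 : pvFinish (c :: x :: xs) acc = acc.reverse ++ [(x :: xs).reverse ++ [c]] := by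
            simp [pvFinish]
          have h2 : pvFinish (x :: xs) acc = acc.reverse ++ [(x :: xs).reverse] := by
            simp [pvFinish]
          rw [h1, h2, pvJoin_snoc, pvJoin_snoc]
          by_cases hac : acc.reverse.isEmpty = true <;> simp [hac]
      rw [hstate]

def pvNormState (t : List Char) : List Char × Bool := t.foldl pvStep ([], false)

theorem pvNorm_eq_normState (t : List Char) : pvNorm t = (pvNormState t).1 := by
  have := pvGo_corr t [] [] (by simp)
  simpa [pvNorm, PySem.Chars.split₀, pvFinish, PySem.Chars.join_nil, pvNormState] using this

theorem pvNormState_snoc (u : List Char) (c : Char) :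
    pvNormState (u ++ [c]) = pvStep (pvNormState u) c := by
  simp [pvNormState]

theorem pvTakeSnoc_prefix_iff (nf : List Char) (q : Nat) (d : Char) (hq : q ≤ nf.length) :
    ((nf.take q ++ [d]) <+: nf) ↔ (q < nf.length ∧ nf[q]? = some d) := by
  constructor
  · intro hp
    have hlen : q + 1 ≤ nf.length := by
      have := hp.length_le
      simpa [List.length_take, Nat.min_eq_left hq] using this
    have hq' : q < nf.length := by omega
    have heq := List.prefix_iff_eq_take.mp hp
    rw [List.length_append, List.length_take, Nat.min_eq_left hq] at heq
    simp only [List.length_singleton] at heq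
    rw [List.take_add_one, List.getElem?_eq_getElem hq'] at heq
    have := List.append_cancel_left heq
    simp only [Option.toList_some, List.cons.injEq] at this
    exact ⟨hq', by rw [List.getElem?_eq_getElem hq', this.1]⟩
  · rintro ⟨h1, h2⟩
    have : nf.take q ++ [d] = nf.take (q + 1) := by
      rw [List.take_add_one, h2]; rfl
    rw [this]
    exact List.take_prefix _ _

theorem pvTakeSnoc_eq_iff (nf : List Char) (q : Nat) (d : Char) (hq : q ≤ nf.length) :
    (nf.take q ++ [d] = nf) ↔ (q + 1 = nf.length ∧ nf[q]? = some d) := by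
  constructor
  · intro h
    have hlen : q + 1 = nf.length := by
      have := congrArg List.length h
      simpa [List.length_take, Nat.min_eq_left hq] using this
    have hp : (nf.take q ++ [d]) <+: nf := by rw [h]
    exact ⟨hlen, ((pvTakeSnoc_prefix_iff nf q d hq).mp hp).2⟩
  · rintro ⟨h1, h2⟩
    have : nf.take q ++ [d] = nf.take (q + 1) := by
      rw [List.take_add_one, h2]; rfl
    rw [this, h1, List.take_length]

theorem pvTake_eq_iff (nf : List Char) (p : Nat) (hp : p ≤ nf.length) :
    (nf.take p = nf) ↔ p = nf.length := by
  rw [List.take_eq_self_iff]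
  omega

def pvFirstM (nf : List Char) : List Char → List Char → Nat → Option Nat
  | _, [], _ => none
  | u, c :: rest, off =>
    if pvNorm (u ++ [c]) = nf then some (off + 1) else pvFirstM nf (u ++ [c]) rest (off + 1)

theorem pvBInner_cons_ws (nf : List Char) (L : Nat) (c : Char) (rest : List Char)
    (off p : Nat) (pending : Bool) (hws : PySem.Chars.isspace c = true) :
    pvBInner nf L (c :: rest) off p pending =
      (if p = L then some (off + 1)
       else pvBInner nf L rest (off + 1) p (if 0 < p then true else pending)) := by
  simp [pvBInner, hws]

theorem pvBInner_cons_word (nf : List Char) (L : Nat) (c : Char) (rest : List Char)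
    (off p : Nat) (pending : Bool) (hws : ¬ PySem.Chars.isspace c = true) :
    pvBInner nf L (c :: rest) off p pending =
      (match (if pending then
                (if p < L ∧ nf[p]? = some ' ' then some (p + 1) else none)
              else some p) with
       | none => none
       | some p1 =>
         if p1 < L ∧ nf[p1]? = some c then
           if p1 + 1 = L then some (off + 1) else pvBInner nf L rest (off + 1) (p1 + 1) false
         else none) := by
  simp only [pvBInner, if_neg hws]

theorem pvFirstM_cons (nf u : List Char) (c : Char) (rest : List Char) (off : Nat) :
    pvFirstM nf u (c :: rest) off =
      (if pvNorm (u ++ [c]) = nf then some (off + 1) else pvFirstM nf (u ++ [c]) rest (off + 1)) := rfl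

theorem pvStep_norm_extends (st : List Char × Bool) (c : Char) :
    ∃ e, (pvStep st c).1 = st.1 ++ e := by
  unfold pvStep
  split
  · exact ⟨[], by simp⟩
  · exact ⟨_, rfl⟩

theorem pvFirstM_none_of_not_prefix (nf : List Char) (rest u : List Char) (off : Nat)
    (h : ¬ (pvNormState u).1 <+: nf) : pvFirstM nf u rest off = none := by
  induction rest generalizing u off with
  | nil => rfl
  | cons c rest ih =>
    obtain ⟨e, he⟩ : ∃ e, (pvNormState (u ++ [c])).1 = (pvNormState u).1 ++ e := by
      rw [pvNormState_snoc]; exact pvStep_norm_extends _ c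
    have hne : pvNorm (u ++ [c]) ≠ nf := by
      rw [pvNorm_eq_normState, he]
      intro hEq
      exact h ⟨e, hEq⟩
    have hnp : ¬ (pvNormState (u ++ [c])).1 <+: nf := by
      rw [he]
      rintro ⟨e', h'⟩
      exact h ⟨e ++ e', by simpa using h'⟩
    simp [pvFirstM, hne, ih _ _ hnp]

theorem pvNorm_snoc (u : List Char) (c : Char) :
    pvNorm (u ++ [c]) = (pvStep (pvNormState u) c).1 := by
  rw [pvNorm_eq_normState, pvNormState_snoc]

theorem pvBInner_eq_firstM (nf : List Char) (rest u : List Char) (off p : Nat) (pending : Bool)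
    (hst : pvNormState u = (nf.take p, pending)) (hp : p ≤ nf.length) :
    pvBInner nf nf.length rest off p pending = pvFirstM nf u rest off := by
  induction rest generalizing u off p pending with
  | nil => rfl
  | cons c rest ih =>
    have hnormc : pvNorm (u ++ [c]) = (pvStep (nf.take p, pending) c).1 := by
      rw [pvNorm_snoc, hst]
    rw [pvFirstM_cons]
    by_cases hws : PySem.Chars.isspace c = true
    · -- whitespace character: norm unchanged
      rw [pvBInner_cons_ws nf nf.length c rest off p pending hws]
      have hnorm : pvNorm (u ++ [c]) = nf.take p := by
        rw [hnormc]; simp [pvStep, hws]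
      by_cases hpL : p = nf.length
      · have hyes : pvNorm (u ++ [c]) = nf := by
          rw [hnorm, hpL, List.take_length]
        rw [if_pos hpL, if_pos hyes]
      · have hne : pvNorm (u ++ [c]) ≠ nf := by
          rw [hnorm]
          intro hEq
          exact hpL ((pvTake_eq_iff nf p hp).mp hEq)
        have hstate' : pvNormState (u ++ [c]) = (nf.take p, if 0 < p then true else pending) := by
          rw [pvNormState_snoc, hst]
          simp only [pvStep, hws, if_pos]
          rcases Nat.eq_zero_or_pos p with h0 | h0
          · subst h0; simp
          · have hnfne : nf ≠ [] := by
              intro hn; subst hn; simp at hp; omega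
            have : (nf.take p).isEmpty = false := by
              simp [List.isEmpty_eq_false_iff, List.take_eq_nil_iff]
              constructor <;> [omega; exact hnfne]
            simp [this, h0]
        rw [if_neg hpL, if_neg hne]
        exact ih _ _ _ _ hstate' hp
    · -- word character
      rw [pvBInner_cons_word nf nf.length c rest off p pending hws]
      by_cases hpend : pending = true
      · subst hpend
        by_cases h1 : p < nf.length ∧ nf[p]? = some ' '
        · -- pending gap consumed
          have hscrut : (if (true : Bool) then
                (if p < nf.length ∧ nf[p]? = some ' ' then some (p + 1) else none)
              else some p) = some (p + 1) := by
            rw [if_pos rfl, if_pos h1]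
          rw [hscrut]
          have htake1 : nf.take p ++ [' '] = nf.take (p + 1) := by
            rw [List.take_add_one, h1.2]; rfl
          have hnorm : pvNorm (u ++ [c]) = nf.take (p + 1) ++ [c] := by
            rw [hnormc]; simp [pvStep, hws, ← htake1]
          have hp1 : p + 1 ≤ nf.length := h1.1
          show (if p + 1 < nf.length ∧ nf[p + 1]? = some c then
                  if p + 1 + 1 = nf.length then some (off + 1)
                  else pvBInner nf nf.length rest (off + 1) (p + 1 + 1) false
                else none) = _
          by_cases h2 : p + 1 < nf.length ∧ nf[p + 1]? = some c
          · rw [if_pos h2]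
            by_cases hL : p + 1 + 1 = nf.length
            · have hyes : pvNorm (u ++ [c]) = nf := by
                rw [hnorm, (pvTakeSnoc_eq_iff nf (p + 1) c hp1).mpr ⟨hL, h2.2⟩]
              rw [if_pos hL, if_pos hyes]
            · have hne : pvNorm (u ++ [c]) ≠ nf := by
                rw [hnorm]
                intro hEq
                exact hL ((pvTakeSnoc_eq_iff nf (p + 1) c hp1).mp hEq).1
              have htake2 : nf.take (p + 1) ++ [c] = nf.take (p + 1 + 1) := by
                rw [List.take_add_one (i := p + 1), h2.2]; rfl
              have hstate' : pvNormState (u ++ [c]) = (nf.take (p + 1 + 1), false) := by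
                rw [pvNormState_snoc, hst]
                simp only [pvStep, hws, Bool.false_eq_true, if_false, if_pos]
                rw [← htake2, ← htake1]
                simp
              rw [if_neg hL, if_neg hne]
              exact ih _ _ _ _ hstate' (by omega)
          · -- mismatch after the gap: break, and no later j can match
            have hnp : ¬ (pvNormState (u ++ [c])).1 <+: nf := by
              rw [pvNormState_snoc, hst]
              have hh : (pvStep (nf.take p, true) c).1 = nf.take (p + 1) ++ [c] := by
                simp [pvStep, hws, ← htake1]
              rw [hh]
              intro hpre
              exact h2 ((pvTakeSnoc_prefix_iff nf (p + 1) c hp1).mp hpre)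
            have hne : pvNorm (u ++ [c]) ≠ nf := by
              rw [pvNorm_eq_normState]
              intro hEq
              exact hnp (hEq ▸ List.prefix_refl _)
            rw [if_neg h2, if_neg hne,
              pvFirstM_none_of_not_prefix nf rest (u ++ [c]) (off + 1) hnp]
        · -- the gap cannot be matched: break
          have hscrut : (if (true : Bool) then
                (if p < nf.length ∧ nf[p]? = some ' ' then some (p + 1) else none)
              else some p) = none := by
            rw [if_pos rfl, if_neg h1]
          rw [hscrut]
          have hnp : ¬ (pvNormState (u ++ [c])).1 <+: nf := by
            rw [pvNormState_snoc, hst]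
            have hh : (pvStep (nf.take p, true) c).1 = (nf.take p ++ [' ']) ++ [c] := by
              simp [pvStep, hws]
            rw [hh]
            intro hpre
            have hpre2 : (nf.take p ++ [' ']) <+: nf :=
              (List.prefix_append _ [c]).trans hpre
            exact h1 ((pvTakeSnoc_prefix_iff nf p ' ' hp).mp hpre2)
          have hne : pvNorm (u ++ [c]) ≠ nf := by
            rw [pvNorm_eq_normState]
            intro hEq
            exact hnp (hEq ▸ List.prefix_refl _)
          rw [if_neg hne, pvFirstM_none_of_not_prefix nf rest (u ++ [c]) (off + 1) hnp]
      · -- no pending gap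
        have hpend' : pending = false := by cases pending <;> simp_all
        subst hpend'
        have hscrut : (if (false : Bool) then
              (if p < nf.length ∧ nf[p]? = some ' ' then some (p + 1) else none)
            else some p) = some p := by
          rw [if_neg (by simp)]
        rw [hscrut]
        show (if p < nf.length ∧ nf[p]? = some c then
                if p + 1 = nf.length then some (off + 1)
                else pvBInner nf nf.length rest (off + 1) (p + 1) false
              else none) = _
        by_cases h2 : p < nf.length ∧ nf[p]? = some c
        · rw [if_pos h2]
          have hnorm : pvNorm (u ++ [c]) = nf.take p ++ [c] := by
            rw [hnormc]; simp [pvStep, hws]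
          by_cases hL : p + 1 = nf.length
          · have hyes : pvNorm (u ++ [c]) = nf := by
              rw [hnorm, (pvTakeSnoc_eq_iff nf p c hp).mpr ⟨hL, h2.2⟩]
            rw [if_pos hL, if_pos hyes]
          · have hne : pvNorm (u ++ [c]) ≠ nf := by
              rw [hnorm]
              intro hEq
              exact hL ((pvTakeSnoc_eq_iff nf p c hp).mp hEq).1
            have htake2 : nf.take p ++ [c] = nf.take (p + 1) := by
              rw [List.take_add_one, h2.2]; rfl
            have hstate' : pvNormState (u ++ [c]) = (nf.take (p + 1), false) := by
              rw [pvNormState_snoc, hst]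
              simp only [pvStep, hws, Bool.false_eq_true, if_false]
              rw [← htake2]
            rw [if_neg hL, if_neg hne]
            exact ih _ _ _ _ hstate' (by omega)
        · have hnp : ¬ (pvNormState (u ++ [c])).1 <+: nf := by
            rw [pvNormState_snoc, hst]
            have hh : (pvStep (nf.take p, false) c).1 = nf.take p ++ [c] := by
              simp [pvStep, hws]
            rw [hh]
            intro hpre
            exact h2 ((pvTakeSnoc_prefix_iff nf p c hp).mp hpre)
          have hne : pvNorm (u ++ [c]) ≠ nf := by
            rw [pvNorm_eq_normState]
            intro hEq
            exact hnp (hEq ▸ List.prefix_refl _)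
          rw [if_neg h2, if_neg hne,
            pvFirstM_none_of_not_prefix nf rest (u ++ [c]) (off + 1) hnp]

theorem pvAInner_eq_firstM (cs nf : List Char) (i : Nat) (rest u : List Char) (off : Nat)
    (hsplit : cs.drop i = u ++ rest) (hoff : off = i + u.length) :
    pvAInner cs nf i (List.range' (off + 1) rest.length) = pvFirstM nf u rest off := by
  induction rest generalizing u off with
  | nil => rfl
  | cons c rest ih =>
    have hslice : PySem.List.slice cs (some (i : Int)) (some ((off + 1 : Nat) : Int)) = u ++ [c] := by
      rw [PySem.List.slice_natCast]
      have h1 : off + 1 - i = u.length + 1 := by omega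
      rw [h1, hsplit]
      have : u ++ c :: rest = (u ++ [c]) ++ rest := by simp
      rw [this]
      exact List.take_left' (by simp)
    rw [List.length_cons, List.range'_succ]
    show (if pvNorm (PySem.List.slice cs (some (i : Int)) (some ((off + 1 : Nat) : Int))) = nf
          then some (off + 1) else pvAInner cs nf i (List.range' (off + 1 + 1) rest.length)) = _
    rw [hslice]
    show _ = (if pvNorm (u ++ [c]) = nf then some (off + 1) else pvFirstM nf (u ++ [c]) rest (off + 1))
    by_cases hEq : pvNorm (u ++ [c]) = nf
    · simp [hEq]
    · simp only [if_neg hEq]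
      exact ih (u ++ [c]) (off + 1) (by simpa using hsplit) (by simp; omega)

theorem pvLoop_eq (cs nf : List Char) (is : List Nat) (h : ∀ i ∈ is, i ≤ cs.length) :
    pvALoop cs nf cs.length is = pvBLoop cs nf is := by
  induction is with
  | nil => rfl
  | cons i is ih =>
    have hlen : cs.length - i = (cs.drop i).length := by simp
    have hinner : pvAInner cs nf i (List.range' (i + 1) (cs.length - i)) =
        pvBInner nf nf.length (cs.drop i) i 0 false := by
      rw [hlen, pvAInner_eq_firstM cs nf i (cs.drop i) [] i (by simp) (by simp),
        pvBInner_eq_firstM nf (cs.drop i) [] i 0 false (by simp [pvNormState]) (by simp)]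
    simp only [pvALoop, pvBLoop, hinner]
    cases hres : pvBInner nf nf.length (cs.drop i) i 0 false with
    | none => exact ih (fun x hx => h x (by simp [hx]))
    | some j =>
      simp only []
      rw [PySem.List.slice_to_natCast, PySem.List.slice_from_natCast]

-- ===== VERDICT (by name: the statement is the Claim_ definition above) =====
theorem whitespace_replace_py_spec : Claim_equal_whitespace_replace_py := by
  intro content find _
  unfold Spec_whitespace_replace_py whitespace_replace_py whitespace_replace_py_alt
  have h := pvLoop_eq content.toList (pvNorm find.toList) (List.range content.toList.length)
    (fun i hi => Nat.le_of_lt (List.mem_range.mp hi))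
  simp only [h]
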